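-- pv_equiv track=rewrite | github.com/Bachmann1234/diff_cover | diff_cover/util.py | to_unescaped_filename
-- ===== SOURCE A (Python) =====
-- def to_unescaped_filename(filename: str) -> str:
--     """Try to unescape the given filename.
--
--     Some filenames given by git might be escaped with C-style escape sequences
--     and surrounded by double quotes.
--     """
--     if not (filename.startswith('"') and filename.endswith('"')):
--         return filename
--
--     # Remove surrounding quotes
--     unquoted = filename[1:-1]
--
--     # Handle C-style escape sequences
--     result = []
--     i = 0
--     while i < len(unquoted):
--         if unquoted[i] == "\\" and i + 1 < len(unquoted):
--             # Handle common C escape sequences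
--             next_char = unquoted[i + 1]
--             result.append(
--                 {
--                     "\\": "\\",
--                     '"': '"',
--                     "a": "a",
--                     "n": "\n",
--                     "t": "\t",
--                     "r": "\r",
--                     "b": "\b",
--                     "f": "\f",
--                 }.get(next_char, next_char)
--             )
--             i += 2
--         else:
--             result.append(unquoted[i])
--             i += 1
--
--     return "".join(result)
-- ===== SOURCE B (Python) =====
-- _ESCAPES = {
--     "\\": "\\",
--     '"': '"',
--     "a": "a",
--     "n": "\n",
--     "t": "\t",
--     "r": "\r",
--     "b": "\b",
--     "f": "\f",
-- }
--
--
-- def to_unescaped_filename(filename: str) -> str: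
--     """Unescape a git-style C-escaped quoted filename.
--
--     Split the unquoted body on backslashes and rebuild it piece-wise:
--     a non-empty piece after a backslash starts with the escaped character,
--     an empty piece means an escaped (or trailing) backslash that also
--     consumes the following piece verbatim.
--     """
--     if not (filename.startswith('"') and filename.endswith('"')):
--         return filename
--     parts = iter(filename[1:-1].split("\\"))
--     out = [next(parts)]
--     for p in parts:
--         if p:
--             out.append(_ESCAPES.get(p[0], p[0]) + p[1:])
--         else:
--             out.append("\\" + next(parts, ""))
--     return "".join(out)
-- ===== Notes on version B (the rewrite author's own statement) =====
-- stated objective: alternative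
-- what changed: Instead of A's per-character index state machine, B splits the unquoted body on backslashes once and rebuilds it piece-wise: a non-empty piece contributes its escaped first character plus its tail, an empty piece stands for an escaped/trailing backslash and consumes the next piece verbatim.
import Mathlib
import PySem

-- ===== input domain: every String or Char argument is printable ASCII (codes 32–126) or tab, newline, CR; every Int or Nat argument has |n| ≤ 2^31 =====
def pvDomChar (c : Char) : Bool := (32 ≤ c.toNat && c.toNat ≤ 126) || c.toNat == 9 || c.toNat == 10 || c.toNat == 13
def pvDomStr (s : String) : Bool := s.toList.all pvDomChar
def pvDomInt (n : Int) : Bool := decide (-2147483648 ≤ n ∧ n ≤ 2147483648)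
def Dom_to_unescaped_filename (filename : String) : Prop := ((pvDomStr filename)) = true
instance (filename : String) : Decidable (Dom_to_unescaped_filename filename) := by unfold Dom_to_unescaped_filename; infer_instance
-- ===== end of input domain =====

-- B replaces A's per-character index state machine by split-on-backslash plus a
-- piece-wise rebuild (objective: alternative, same cost).

-- ===== PORT A =====
-- the escape dict literal of A's loop body
def pvEscDictA : PySem.Dict Char Char :=
  PySem.Dict.ofList
    [('\\', '\\'), ('"', '"'), ('a', 'a'), ('n', '\n'), ('t', '\t'),
     ('r', '\r'), ('b', Char.ofNat 8), ('f', Char.ofNat 12)]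

-- A's while-loop: index i, two-char consumption of an escape
def pvLoopA (u : List Char) (i : Nat) (result : List Char) : List Char :=
  if h : i < u.length then
    if h2 : u[i] = '\\' ∧ i + 1 < u.length then
      pvLoopA u (i + 2) (result ++ [PySem.Dict.getD pvEscDictA (u[i+1]'h2.2) (u[i+1]'h2.2)])
    else
      pvLoopA u (i + 1) (result ++ [u[i]])
  else result
termination_by u.length - i

def to_unescaped_filename (filename : String) : String :=
  if ¬ (PySem.Str.startswith filename "\"" && PySem.Str.endswith filename "\"") then
    filename
  else
    let unquoted := PySem.Str.slice filename (some 1) (some (-1))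
    String.ofList (pvLoopA unquoted.toList 0 [])

-- ===== PORT B =====
-- the module-level _ESCAPES dict of Source B
def pvEscDictB : PySem.Dict Char Char :=
  PySem.Dict.ofList
    [('\\', '\\'), ('"', '"'), ('a', 'a'), ('n', '\n'), ('t', '\t'),
     ('r', '\r'), ('b', Char.ofNat 8), ('f', Char.ofNat 12)]

-- Source B's for-loop over the remaining split pieces (the inner next(parts, "")
-- consumes the following piece, hence recursion over the list of pieces)
def pvPartsB : List (List Char) → List Char
  | [] => []
  | [] :: [] => ['\\']
  | [] :: q :: rest => '\\' :: q ++ pvPartsB rest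
  | (c :: pt) :: rest => PySem.Dict.getD pvEscDictB c c :: pt ++ pvPartsB rest

def to_unescaped_filename_alt (filename : String) : String :=
  if ¬ (PySem.Str.startswith filename "\"" && PySem.Str.endswith filename "\"") then
    filename
  else
    match PySem.Chars.splitOn (PySem.Str.slice filename (some 1) (some (-1))).toList "\\".toList with
    | [] => ""   -- unreachable: str.split never returns an empty list (next(parts) never raises)
    | first :: rest => String.ofList (first ++ pvPartsB rest)

-- ===== PRECONDITION & SPEC =====
def Spec_to_unescaped_filename (filename : String) (out : String) : Prop := out = to_unescaped_filename_alt filename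
instance (filename : String) (out : String) : Decidable (Spec_to_unescaped_filename filename out) := by unfold Spec_to_unescaped_filename; infer_instance

-- ===== CLAIM (what is proved, stated in full; the proofs are below) =====
def Claim_equal_to_unescaped_filename : Prop := ∀ (filename : String), Dom_to_unescaped_filename filename → Spec_to_unescaped_filename filename (to_unescaped_filename filename)

-- ===== LEMMAS AND PROOFS =====

-- reference unescaper both ports are proved equal to
def pvUnesc : List Char → List Char
  | [] => []
  | '\\' :: c :: r => PySem.Dict.getD pvEscDictA c c :: pvUnesc r
  | c :: r => c :: pvUnesc r

theorem pvUnesc_cons_ne (c : Char) (r : List Char) (hc : c ≠ '\\') :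
    pvUnesc (c :: r) = c :: pvUnesc r := by
  rw [pvUnesc.eq_def]; split <;> simp_all

theorem pvUnesc_single (c : Char) : pvUnesc [c] = [c] := by
  rw [pvUnesc.eq_def]; split <;> simp_all [pvUnesc]

theorem pvUnesc_esc (c : Char) (r : List Char) :
    pvUnesc ('\\' :: c :: r) = PySem.Dict.getD pvEscDictA c c :: pvUnesc r := rfl

theorem pvLoopA_eq (u : List Char) : ∀ (i : Nat) (acc : List Char),
    pvLoopA u i acc = acc ++ pvUnesc (u.drop i) := by
  refine pvLoopA.induct u (fun i acc => pvLoopA u i acc = acc ++ pvUnesc (u.drop i)) ?_ ?_ ?_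
  · intro i acc h h2 ih
    rw [pvLoopA, dif_pos h, dif_pos h2, ih]
    have hd : u.drop i = '\\' :: u[i+1] :: u.drop (i+2) := by
      rw [List.drop_eq_getElem_cons h, List.drop_eq_getElem_cons h2.2]
      simp [h2.1]
    rw [hd, pvUnesc_esc]
    simp
  · intro i acc h h2 ih
    rw [pvLoopA, dif_pos h, dif_neg h2, ih]
    have hd : u.drop i = u[i] :: u.drop (i+1) := List.drop_eq_getElem_cons h
    rw [hd]
    by_cases hc : u[i] = '\\'
    · have hl : ¬ i + 1 < u.length := fun hl => h2 ⟨hc, hl⟩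
      have hnil : u.drop (i+1) = [] := List.drop_eq_nil_of_le (by omega)
      rw [hnil, hc, pvUnesc_single]
      simp [pvUnesc]
    · rw [pvUnesc_cons_ne _ _ hc]
      simp
  · intro i acc h
    rw [pvLoopA, dif_neg h]
    simp [List.drop_eq_nil_of_le (by omega : u.length ≤ i), pvUnesc]

-- simple structural splitter on '\' used to characterise PySem.Chars.splitOn
def pvSplitc : List Char → List (List Char)
  | [] => [[]]
  | c :: r =>
    if c = '\\' then [] :: pvSplitc r
    else
      match pvSplitc r with
      | [] => [[c]]
      | h :: t => (c :: h) :: t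

def pvMapHead (f : List Char → List Char) : List (List Char) → List (List Char)
  | [] => []
  | h :: t => f h :: t

theorem pvSplitc_ne_nil (l : List Char) : pvSplitc l ≠ [] := by
  cases l with
  | nil => simp [pvSplitc]
  | cons c r =>
    simp only [pvSplitc]
    split
    · simp
    · split <;> simp

theorem pvMapHead_id (xs : List (List Char)) : pvMapHead (fun x => x) xs = xs := by
  cases xs <;> simp [pvMapHead]

theorem pvGo_eq : ∀ (fuel : Nat) (l cur : List Char) (acc : List (List Char)), l.length ≤ fuel →
    PySem.Chars.splitOn.go ['\\'] fuel l cur acc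
      = acc.reverse ++ pvMapHead (cur.reverse ++ ·) (pvSplitc l) := by
  intro fuel
  induction fuel with
  | zero =>
    intro l cur acc h
    have : l = [] := List.eq_nil_of_length_eq_zero (by omega)
    subst this
    rw [PySem.Chars.splitOn.go.eq_def]
    simp [pvSplitc, pvMapHead]
  | succ f ih =>
    intro l cur acc h
    cases l with
    | nil =>
      rw [PySem.Chars.splitOn.go.eq_def]
      simp [pvSplitc, pvMapHead]
    | cons c r =>
      rw [PySem.Chars.splitOn.go.eq_def]
      by_cases hc : c = '\\'
      · subst hc
        have hpre : List.isPrefixOf ['\\'] ('\\' :: r) = true := by simp [List.isPrefixOf]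
        simp only [hpre, if_true]
        simp only [List.length_cons] at h
        rw [ih _ _ _ (by simpa using Nat.le_of_succ_le_succ h)]
        simp only [pvSplitc, List.length_cons, List.length_nil,
          List.drop_succ_cons, List.drop_zero]
        rcases hsp : pvSplitc r with _ | ⟨hh, tt⟩
        · exact absurd hsp (pvSplitc_ne_nil r)
        · simp [pvMapHead]
      · have hpre : List.isPrefixOf ['\\'] (c :: r) = false := by
          simp [List.isPrefixOf]
          exact fun he => absurd he.symm hc
        simp only [hpre, Bool.false_eq_true, if_false]
        simp only [List.length_cons] at h
        rw [ih _ _ _ (Nat.le_of_succ_le_succ h)]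
        simp only [pvSplitc, if_neg hc]
        rcases hsp : pvSplitc r with _ | ⟨hh, tt⟩
        · exact absurd hsp (pvSplitc_ne_nil r)
        · simp [pvMapHead]

theorem pvSplitOn_eq (l : List Char) :
    PySem.Chars.splitOn l ['\\'] = pvSplitc l := by
  rw [PySem.Chars.splitOn, pvGo_eq (l.length + 1) l [] [] (by omega)]
  simp [pvMapHead_id]

-- the split-pieces rebuild equals the reference unescaper
theorem pvParts_eq (l : List Char) :
    (match pvSplitc l with
     | [] => ([] : List Char)
     | first :: rest => first ++ pvPartsB rest) = pvUnesc l := by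
  induction l using pvUnesc.induct with
  | case1 => simp [pvSplitc, pvPartsB, pvUnesc]
  | case2 c r ih =>
    have hB : pvEscDictB = pvEscDictA := rfl
    simp only [pvSplitc]  -- peels the leading backslash
    by_cases hc : c = '\\'
    · subst hc
      rcases hsp : pvSplitc r with _ | ⟨hh, tt⟩
      · exact absurd hsp (pvSplitc_ne_nil r)
      · rw [hsp] at ih
        simp only [pvUnesc_esc]
        simp only [← ih]
        rfl
    · simp only [if_neg hc]
      rcases hsp : pvSplitc r with _ | ⟨hh, tt⟩
      · exact absurd hsp (pvSplitc_ne_nil r)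
      · rw [hsp] at ih
        simp only [pvUnesc_esc]
        simp only [← ih]
        rfl
  | case3 c r hne ih =>
    by_cases hc : c = '\\'
    · cases r with
      | nil =>
        subst hc
        simp [pvSplitc, pvPartsB, pvUnesc_single]
      | cons a t => exact (hne a t hc rfl).elim
    · rw [pvUnesc_cons_ne _ _ hc]
      simp only [pvSplitc, if_neg hc]
      rcases hsp : pvSplitc r with _ | ⟨hh, tt⟩
      · exact absurd hsp (pvSplitc_ne_nil r)
      · rw [hsp] at ih
        cases hh with
        | nil => simp_all
        | cons d dt => simp_all

-- ===== VERDICT (by name: the statement is the Claim_ definition above) =====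
theorem to_unescaped_filename_spec : Claim_equal_to_unescaped_filename := by
  intro filename _
  unfold Spec_to_unescaped_filename to_unescaped_filename to_unescaped_filename_alt
  split
  · rfl
  · have hsep : "\\".toList = ['\\'] := rfl
    simp only [hsep, pvSplitOn_eq, pvLoopA_eq]
    rcases hsp : pvSplitc (PySem.Str.slice filename (some 1) (some (-1))).toList
      with _ | ⟨hh, tt⟩
    · exact absurd hsp (pvSplitc_ne_nil _)
    · have := pvParts_eq (PySem.Str.slice filename (some 1) (some (-1))).toList
      rw [hsp] at this
      simp only [List.nil_append, List.drop_zero, ← this]
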